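-- pv_equiv track=rewrite | github.com/rizaesop/coding-exercises | leetcode/first-time/58.最后一个单词的长度.py | lengthOfLastWord
-- ===== SOURCE A (Python) =====
-- def lengthOfLastWord(s):
--     # ans = 0
--     # for i in range(len(s)):
--     #     if 'a'<= s[i] and s[i]<='z':
--     #         ans += 1
--     #     elif s[i]== ' ' and s[i+1]:
--     #         ans = 0
--     # return ans
--     right = len(s)-1
--     while right>= 0:
--         if s[right]!= ' ':
--             break
--         right -= 1
--     if right == 0:
--         return 1
--     left = right
--     while left >= 0:
--         if s[left]==' ':
--             if left == 0:
--                 return right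
--             break
--         left -= 1
--     return right-left
-- ===== SOURCE B (Python) =====
-- def lengthOfLastWord(s):
--     cur = ans = 0
--     for c in s:
--         if c == ' ':
--             cur = 0
--         else:
--             cur += 1
--             ans = cur
--     return ans
-- ===== Notes on version B (the rewrite author's own statement) =====
-- stated objective: simpler
-- what changed: Replaces A's backward two-pointer index scan (skip trailing spaces, then scan left for the word start) with a single forward pass that resets a run counter at each space and remembers the length of the latest non-space run.
import Mathlib
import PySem

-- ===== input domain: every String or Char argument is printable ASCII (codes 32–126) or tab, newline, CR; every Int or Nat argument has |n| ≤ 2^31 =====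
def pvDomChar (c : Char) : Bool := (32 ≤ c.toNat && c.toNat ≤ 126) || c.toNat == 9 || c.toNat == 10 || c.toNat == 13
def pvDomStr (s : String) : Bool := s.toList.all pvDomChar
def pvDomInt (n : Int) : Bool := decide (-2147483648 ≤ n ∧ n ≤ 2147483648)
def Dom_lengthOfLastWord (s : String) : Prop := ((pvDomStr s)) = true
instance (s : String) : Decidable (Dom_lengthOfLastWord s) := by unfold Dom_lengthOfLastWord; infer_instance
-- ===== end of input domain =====

-- B replaces A's backward two-pointer index scan with a single forward pass keeping a run counter ('simpler').

-- ===== PORT A =====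
-- first while loop of A: right starts at len(s)-1 and moves left past spaces; the argument n is right+1
-- (every index read is in range when called below, so List.getD's default is never used)
def aSkipSpaces (cs : List Char) : Nat → Int
  | 0 => -1
  | n + 1 => if cs.getD n ' ' ≠ ' ' then (n : Int) else aSkipSpaces cs n

-- second while loop of A: left starts at right and moves left to a space; the argument n is left+1
def aFindLeft (cs : List Char) (right : Int) : Nat → Int
  | 0 => right - (-1)                 -- loop fell through: left = -1, then 'return right-left'
  | n + 1 =>
      if cs.getD n ' ' = ' ' then
        (if (n : Int) = 0 then right  -- 'if left == 0: return right'
         else right - (n : Int))      -- 'break', then 'return right-left'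
      else aFindLeft cs right n

def lengthOfLastWord (s : String) : Int :=
  let cs := s.toList
  let right := aSkipSpaces cs cs.length
  if right = 0 then 1
  else aFindLeft cs right (right + 1).toNat

-- ===== PORT B =====
-- loop body of B on state (cur, ans): reset cur at a space, else extend the run and record it
def bStep (st : Int × Int) (c : Char) : Int × Int :=
  if c = ' ' then (0, st.2) else (st.1 + 1, st.1 + 1)

def lengthOfLastWord_alt (s : String) : Int :=
  (s.toList.foldl bStep (0, 0)).2

-- ===== PRECONDITION & SPEC =====
def Spec_lengthOfLastWord (s : String) (out : Int) : Prop := out = lengthOfLastWord_alt s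
instance (s : String) (out : Int) : Decidable (Spec_lengthOfLastWord s out) := by unfold Spec_lengthOfLastWord; infer_instance

-- ===== CLAIM (what is proved, stated in full; the proofs are below) =====
def Claim_equal_lengthOfLastWord : Prop := ∀ (s : String), Dom_lengthOfLastWord s → Spec_lengthOfLastWord s (lengthOfLastWord s)

-- ===== LEMMAS AND PROOFS =====

-- the common value both programs compute: the length of the last maximal run of non-space characters
def specV (cs : List Char) : Nat :=
  ((cs.reverse.dropWhile (· == ' ')).takeWhile (· != ' ')).length

theorem take_succ_reverse (l : List Char) (n : Nat) (h : n < l.length) :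
    (l.take (n+1)).reverse = l[n] :: (l.take n).reverse := by
  rw [List.take_add_one]; simp [List.getElem?_eq_getElem h]

-- B's fold: first component = length of the current trailing non-space run, second = specV
theorem bStep_foldl (cs : List Char) :
    cs.foldl bStep (0, 0) = (((cs.reverse.takeWhile (· != ' ')).length : Int), (specV cs : Int)) := by
  induction cs using List.reverseRecOn with
  | nil => simp [specV]
  | append_singleton l c ih =>
      rw [List.foldl_append, ih]
      by_cases hc : c = ' '
      · subst hc; simp [bStep, specV]
      · have hcb : (c == ' ') = false := by simpa using hc
        simp [bStep, hc, specV, hcb]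

-- A's first loop returns (number of chars scanned) - 1 - (number of trailing spaces), i.e. the last non-space index (or -1)
theorem aSkip_eq (cs : List Char) (n : Nat) (h : n ≤ cs.length) :
    aSkipSpaces cs n = (n : Int) - 1 - (((cs.take n).reverse.takeWhile (· == ' ')).length : Int) := by
  induction n with
  | zero => simp [aSkipSpaces]
  | succ m ih =>
      have hm : m < cs.length := h
      have hg : cs.getD m ' ' = cs[m] := List.getD_eq_getElem cs ' ' hm
      rw [aSkipSpaces, hg, take_succ_reverse cs m hm]
      by_cases hsp : cs[m] = ' '
      · have : ¬ (cs[m] ≠ ' ') := by simpa using hsp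
        rw [if_neg this, ih (Nat.le_of_lt hm)]
        simp [hsp]
        ring
      · rw [if_pos hsp]
        have hb : (cs[m] == ' ') = false := by simpa using hsp
        simp [hb]

-- A's second loop returns right - (index of the space before the word), i.e. right - n + 1 + (run length left of n)
theorem aLeft_eq (cs : List Char) (right : Int) (n : Nat) (h : n ≤ cs.length) :
    aFindLeft cs right n
      = right - (n : Int) + 1 + (((cs.take n).reverse.takeWhile (· != ' ')).length : Int) := by
  induction n with
  | zero => simp [aFindLeft]
  | succ m ih =>
      have hm : m < cs.length := h
      have hg : cs.getD m ' ' = cs[m] := List.getD_eq_getElem cs ' ' hm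
      rw [aFindLeft, hg, take_succ_reverse cs m hm]
      by_cases hsp : cs[m] = ' '
      · rw [if_pos hsp]
        have hb : (cs[m] != ' ') = false := by simp [hsp]
        simp [hb]
        split_ifs <;> omega
      · rw [if_neg hsp, ih (Nat.le_of_lt hm)]
        have hb : (cs[m] != ' ') = true := by simp [hsp]
        simp [hb]
        ring

theorem dropWhile_eq_drop_tw (l : List Char) (p : Char → Bool) :
    l.dropWhile p = l.drop (l.takeWhile p).length := by
  induction l with
  | nil => simp
  | cons a t ih => by_cases h : p a <;> simp [h, ih]

-- A also computes specV (case split: all-spaces, one-letter last word at index 0, general)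
theorem A_eq_spec (s : String) : lengthOfLastWord s = (specV s.toList : Int) := by
  have main : ∀ cs : List Char,
      (if aSkipSpaces cs cs.length = 0 then (1:Int)
       else aFindLeft cs (aSkipSpaces cs cs.length) (aSkipSpaces cs cs.length + 1).toNat)
        = (specV cs : Int) := by
    intro cs
    obtain ⟨t, ht⟩ : ∃ t, (cs.reverse.takeWhile (· == ' ')).length = t := ⟨_, rfl⟩
    have htL : t ≤ cs.length := by
      rw [← ht]
      simpa using (cs.reverse.takeWhile_prefix (· == ' ')).length_le
    have hskip : aSkipSpaces cs cs.length = (cs.length : Int) - 1 - (t : Int) := by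
      rw [aSkip_eq cs cs.length le_rfl]; simp [ht]
    rw [hskip]
    have hdrop : cs.reverse.dropWhile (· == ' ') = cs.reverse.drop t := by
      rw [dropWhile_eq_drop_tw, ht]
    by_cases hall : t = cs.length
    · have hdw : cs.reverse.dropWhile (· == ' ') = [] := by
        rw [hdrop, hall]; simp
      have hne : ¬ ((cs.length : Int) - 1 - (t : Int) = 0) := by omega
      rw [if_neg hne]
      have h0 : (((cs.length : Int) - 1 - (t : Int)) + 1).toNat = 0 := by omega
      rw [h0]
      simp [aFindLeft, specV, hdw]
      omega
    · have hlt : t < cs.length := lt_of_le_of_ne htL hall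
      have htake : (cs.take (cs.length - t)).reverse = cs.reverse.drop t := by
        rw [List.reverse_take]
        congr 1
        omega
      have hlen : (cs.reverse.drop t).length = cs.length - t := by simp
      have hspec : specV cs = ((cs.take (cs.length - t)).reverse.takeWhile (· != ' ')).length := by
        rw [specV, hdrop, htake]
      by_cases hr0 : (cs.length : Int) - 1 - (t : Int) = 0
      · rw [if_pos hr0]
        have h1 : (cs.reverse.drop t).length = 1 := by omega
        obtain ⟨x, hx⟩ := List.length_eq_one_iff.mp h1
        have hxd : cs.reverse.dropWhile (· == ' ') = [x] := by rw [hdrop, hx]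
        have hpx : (x == ' ') = false := by
          have h2 := List.head?_dropWhile_not (· == ' ') cs.reverse
          rw [hxd] at h2; simpa using h2
        have hxne : (x != ' ') = true := by simp_all
        rw [specV, hxd]
        simp [hxne]
      · rw [if_neg hr0]
        have hn : (((cs.length : Int) - 1 - (t : Int)) + 1).toNat = cs.length - t := by omega
        rw [hn, aLeft_eq cs _ (cs.length - t) (Nat.sub_le _ _), hspec]
        have hc : ((cs.length - t : Nat) : Int) = (cs.length : Int) - (t : Int) := by omega
        rw [hc]
        ring
  simpa [lengthOfLastWord] using main s.toList

-- ===== VERDICT (by name: the statement is the Claim_ definition above) =====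
theorem lengthOfLastWord_spec : Claim_equal_lengthOfLastWord := by
  intro s _
  unfold Spec_lengthOfLastWord lengthOfLastWord_alt
  rw [bStep_foldl, A_eq_spec]
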